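-- pv_equiv track=rewrite | github.com/GareemaRanjan/coding_practice | shaquille/infinite_line.py | solution
-- ===== SOURCE A (Python) =====
-- def solution(operations):
--     obstacles = set()
--     result = []
--
--     # Maintain a list to keep track of obstacle positions in sorted order
--     obstacle_list = []
--
--     for operation in operations:
--         if operation[0] == 1:
--             # Add obstacle at coordinate x
--             _, x = operation
--             if x not in obstacles:
--                 obstacles.add(x)
--                 # Insert obstacle in sorted order (using binary insertion)
--                 from bisect import insort
--
--                 insort(obstacle_list, x)
--         elif operation[0] == 2:
--             # Check if we can build a block of size `size` starting from `x`
--             _, x, size = operation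
--             end = x + size - 1
--
--             # Use binary search to efficiently check if there are obstacles in the range [x, end]
--             from bisect import bisect_left, bisect_right
--
--             left_index = bisect_left(obstacle_list, x)
--             right_index = bisect_right(obstacle_list, end)
--
--             # If there are any obstacles in the range, we can't build
--             if left_index < right_index:
--                 result.append("0")
--             else:
--                 result.append("1")
--
--     return "".join(result)
-- ===== SOURCE B (Python) =====
-- def solution(operations):
--     # No obstacle structure at all: each query re-scans the operations issued before it.
--     out = ""
--     for i, op in enumerate(operations):
--         if op and op[0] == 2:
--             x = op[1]
--             end = x + op[2] - 1
--             hit = any(p and p[0] == 1 and x <= p[1] <= end for p in operations[:i])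
--             out += "0" if hit else "1"
--     return out
-- ===== Notes on version B (the rewrite author's own statement) =====
-- stated objective: simpler
-- what changed: B keeps no state at all (no set, no sorted list, no bisect): it walks the operations once and answers each type-2 query by rescanning the prefix of earlier operations for an add in [x, x+size-1], accumulating the answer string directly.
import Mathlib
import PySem

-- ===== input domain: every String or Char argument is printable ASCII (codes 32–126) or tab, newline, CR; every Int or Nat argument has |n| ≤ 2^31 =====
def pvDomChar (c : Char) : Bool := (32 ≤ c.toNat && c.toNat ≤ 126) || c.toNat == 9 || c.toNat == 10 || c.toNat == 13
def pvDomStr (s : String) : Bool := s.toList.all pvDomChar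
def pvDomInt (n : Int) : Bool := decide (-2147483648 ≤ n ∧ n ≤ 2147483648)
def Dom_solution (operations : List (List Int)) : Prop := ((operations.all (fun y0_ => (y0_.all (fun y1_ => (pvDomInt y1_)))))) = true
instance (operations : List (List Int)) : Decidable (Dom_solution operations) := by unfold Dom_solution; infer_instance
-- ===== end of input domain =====

-- B drops A's obstacle set and sorted bisect list entirely: it answers each query by
-- rescanning the prefix of earlier operations; simpler (stateless), same results.


-- ===== PORT A =====
-- bisect.insort(a, x) is exactly a.insert(bisect_right(a, x), x) (CPython); bisect_left/right are PySem primitives.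
def solutionStepA (st : PySem.Set Int × List String × List Int) (op : List Int) :
    PySem.Set Int × List String × List Int :=
  let obstacles := st.1
  let result := st.2.1
  let obstacleList := st.2.2
  if PySem.List.pyGetD op 0 0 == 1 then
    let x := PySem.List.pyGetD op 1 0
    if PySem.Set.contains obstacles x then st
    else (PySem.Set.add obstacles x, result,
          PySem.List.insert obstacleList (PySem.List.bisectRight obstacleList x : Int) x)
  else if PySem.List.pyGetD op 0 0 == 2 then
    let x := PySem.List.pyGetD op 1 0
    let size := PySem.List.pyGetD op 2 0
    let e := x + size - 1
    let leftIndex := PySem.List.bisectLeft obstacleList x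
    let rightIndex := PySem.List.bisectRight obstacleList e
    (obstacles, result ++ [if leftIndex < rightIndex then "0" else "1"], obstacleList)
  else st

def solution (operations : List (List Int)) : String :=
  PySem.Str.join "" (operations.foldl solutionStepA (PySem.Set.empty, [], [])).2.1

-- ===== PORT B =====
-- the generator expression 'any(p and p[0] == 1 and x <= p[1] <= end for p in operations[:i])'
def hitB (prefixOps : List (List Int)) (x e : Int) : Bool :=
  prefixOps.any (fun p =>
    !p.isEmpty && PySem.List.pyGetD p 0 0 == 1 &&
    decide (x ≤ PySem.List.pyGetD p 1 0) && decide (PySem.List.pyGetD p 1 0 ≤ e))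

-- the body of B's 'for i, op in enumerate(operations)' loop, accumulating the output string
def solutionStepB (operations : List (List Int)) (out : String) (iop : Int × List Int) : String :=
  let op := iop.2
  if !op.isEmpty && PySem.List.pyGetD op 0 0 == 2 then
    let x := PySem.List.pyGetD op 1 0
    let e := x + PySem.List.pyGetD op 2 0 - 1
    out ++ (if hitB (PySem.List.slice operations none (some iop.1)) x e then "0" else "1")
  else out

def solution_alt (operations : List (List Int)) : String :=
  (PySem.List.enumerate operations).foldl (solutionStepB operations) ""

-- ===== PRECONDITION & SPEC =====
-- Pre_ excludes exactly the inputs on which the Python A raises: an empty operation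
-- (IndexError on operation[0]) or an add/query operation whose length does not match the
-- tuple unpacking (ValueError).
def Pre_solution (operations : List (List Int)) : Prop :=
  ∀ op ∈ operations, op ≠ [] ∧ (op.headI = 1 → op.length = 2) ∧ (op.headI = 2 → op.length = 3)
instance (operations : List (List Int)) : Decidable (Pre_solution operations) := by
  unfold Pre_solution; infer_instance

def pvWitness_solution : List (List Int) := [[1, 5], [2, 4, 3], [2, 6, 2]]

def Spec_solution (operations : List (List Int)) (out : String) : Prop := out = solution_alt operations
instance (operations : List (List Int)) (out : String) : Decidable (Spec_solution operations out) := by unfold Spec_solution; infer_instance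

-- ===== CLAIM (what is proved, stated in full; the proofs are below) =====
def Claim_equal_solution : Prop := ∀ (operations : List (List Int)), Dom_solution operations → Pre_solution operations → Spec_solution operations (solution operations)

-- ===== LEMMAS AND PROOFS =====

-- joining with the empty separator appends
theorem join_empty_snoc (res : List String) (a : String) :
    PySem.Str.join "" (res ++ [a]) = PySem.Str.join "" res ++ a := by
  have hflat : ∀ xs : List (List Char), ([] : List Char).intercalate xs = xs.flatten := by
    intro xs
    induction xs with
    | nil => rfl
    | cons b t ih =>
      cases t with
      | nil => simp [List.intercalate]
      | cons c u =>
        simp [List.intercalate, List.intersperse] at ih ⊢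
        exact ih
  simp [PySem.Str.join, PySem.Chars.join, hflat, String.ofList_append]

-- A's bisect window test on the sorted list detects exactly an obstacle in [x, e].
theorem bisect_window (l : List Int) (hl : l.Pairwise (fun a b => a ≤ b)) (x e : Int) :
    PySem.List.bisectLeft l x < PySem.List.bisectRight l e ↔ ∃ o ∈ l, x ≤ o ∧ o ≤ e := by
  obtain ⟨hbl_le, hbl_lt, hbl_ge⟩ := PySem.List.bisectLeft_spec l x hl
  obtain ⟨hbr_le, hbr_lt, hbr_ge⟩ := PySem.List.bisectRight_spec l e hl
  constructor
  · intro h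
    have hj : PySem.List.bisectLeft l x < l.length := lt_of_lt_of_le h hbr_le
    exact ⟨l[PySem.List.bisectLeft l x], List.getElem_mem hj,
      hbl_ge _ hj le_rfl, hbr_lt _ hj h⟩
  · rintro ⟨o, ho, hx, he⟩
    obtain ⟨j, hjlen, rfl⟩ := List.getElem_of_mem ho
    by_contra hc
    push Not at hc
    rcases Nat.lt_or_ge j (PySem.List.bisectRight l e) with h1 | h1
    · have := hbl_lt j hjlen (lt_of_lt_of_le h1 hc); omega
    · have := hbr_ge j hjlen h1; omega

-- Inserting x at bisect_right keeps the list sorted.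
theorem insort_pairwise (l : List Int) (hl : l.Pairwise (fun a b => a ≤ b)) (x : Int) :
    (l.take (PySem.List.bisectRight l x) ++ x :: l.drop (PySem.List.bisectRight l x)).Pairwise
      (fun a b => a ≤ b) := by
  obtain ⟨hbr_le, hbr_lt, hbr_ge⟩ := PySem.List.bisectRight_spec l x hl
  set k := PySem.List.bisectRight l x with hk
  have hdrop : ∀ b ∈ l.drop k, x ≤ b := by
    intro b hb
    obtain ⟨i, hi, rfl⟩ := List.getElem_of_mem hb
    rw [List.getElem_drop]
    have hlen : k + i < l.length := by
      have := hi; simp [List.length_drop] at this; omega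
    exact le_of_lt (hbr_ge (k + i) hlen (Nat.le_add_right _ _))
  have htake : ∀ a ∈ l.take k, a ≤ x := by
    intro a ha
    obtain ⟨i, hi, rfl⟩ := List.getElem_of_mem ha
    rw [List.getElem_take]
    have hik : i < k := by
      have := hi; simp [List.length_take] at this; omega
    have hlen : i < l.length := by
      have := hi; simp [List.length_take] at this; omega
    exact hbr_lt i hlen hik
  rw [List.pairwise_append]
  refine ⟨hl.sublist (List.take_sublist _ _), ?_, ?_⟩
  · rw [List.pairwise_cons]
    exact ⟨hdrop, hl.sublist (List.drop_sublist _ _)⟩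
  · intro a ha b hb
    rcases List.mem_cons.mp hb with rfl | hb
    · exact htake a ha
    · exact le_trans (htake a ha) (hdrop b hb)

-- an operation whose first default-read is nonzero is nonempty
theorem ne_nil_of_pyGetD (op : List Int) (v : Int) (hv : v ≠ 0)
    (h : PySem.List.pyGetD op 0 0 = v) : op ≠ [] := by
  intro hnil; subst hnil
  simp [PySem.List.pyGetD, PySem.List.pyGet?] at h
  exact hv h.symm

-- Core invariant: A's fold over the remaining operations produces, appended to the output so
-- far, exactly B's enumerate-fold over the same suffix, provided A's set s holds exactly the
-- add-coordinates of the already-consumed prefix and l is s sorted.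
theorem fold_agree (opsAll : List (List Int)) :
    ∀ (rest pre : List (List Int)) (s : PySem.Set Int) (res : List String) (l : List Int),
      pre ++ rest = opsAll →
      l.Perm s → l.Pairwise (fun a b => a ≤ b) →
      (∀ o : Int, o ∈ s ↔ ∃ p ∈ pre, PySem.List.pyGetD p 0 0 = 1 ∧ PySem.List.pyGetD p 1 0 = o) →
      PySem.Str.join "" ((rest.foldl solutionStepA (s, res, l)).2.1)
        = (PySem.List.enumerate rest (pre.length : Int)).foldl (solutionStepB opsAll)
            (PySem.Str.join "" res) := by
  intro rest
  induction rest with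
  | nil =>
    intro pre s res l _ _ _ _
    simp [PySem.List.enumerate]
  | cons op rest2 ih =>
    intro pre s res l hsplit hperm hsorted hinv
    have htake : PySem.List.slice opsAll none (some (pre.length : Int)) = pre := by
      rw [PySem.List.slice_to _ (by positivity)]
      simp [← hsplit, List.take_left']
    have henum : PySem.List.enumerate (op :: rest2) (pre.length : Int)
        = ((pre.length : Int), op) :: PySem.List.enumerate rest2 ((pre.length : Int) + 1) := by
      simp [PySem.List.enumerate]
    have hlen' : ((pre ++ [op]).length : Int) = (pre.length : Int) + 1 := by
      simp
    rw [List.foldl_cons, henum, List.foldl_cons]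
    by_cases h1 : PySem.List.pyGetD op 0 0 = 1
    · -- add
    -- B skips (head is 1, not 2)
      have hB : solutionStepB opsAll (PySem.Str.join "" res) ((pre.length : Int), op)
          = PySem.Str.join "" res := by
        have : op ≠ [] := ne_nil_of_pyGetD op 1 (by norm_num) h1
        simp [solutionStepB, h1]
      rw [hB, ← hlen']
      by_cases hmem : PySem.List.pyGetD op 1 0 ∈ s
      · have hA : solutionStepA (s, res, l) op = (s, res, l) := by
          simp [solutionStepA, h1, hmem]
        rw [hA]
        refine ih (pre ++ [op]) s res l (by simp [← hsplit]) hperm hsorted ?_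
        intro o
        constructor
        · intro ho
          obtain ⟨p, hp, h⟩ := (hinv o).mp ho
          exact ⟨p, by simp [hp], h⟩
        · rintro ⟨p, hp, hh1, hh2⟩
          rcases List.mem_append.mp hp with hp | hp
          · exact (hinv o).mpr ⟨p, hp, hh1, hh2⟩
          · simp at hp; subst hp; exact hh2 ▸ hmem
      · have hc : ¬ PySem.Set.contains s (PySem.List.pyGetD op 1 0) = true := by
          rw [PySem.Set.contains_iff]; exact hmem
        have hA : solutionStepA (s, res, l) op =
            (PySem.Set.add s (PySem.List.pyGetD op 1 0), res,
             PySem.List.insert l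
               (PySem.List.bisectRight l (PySem.List.pyGetD op 1 0) : Int)
               (PySem.List.pyGetD op 1 0)) := by
          simp [solutionStepA, h1, hmem]
        rw [hA]
        have hkle : PySem.List.bisectRight l (PySem.List.pyGetD op 1 0) ≤ l.length :=
          (PySem.List.bisectRight_spec l (PySem.List.pyGetD op 1 0) hsorted).1
        have hins := PySem.List.insert_natCast l
          (PySem.List.bisectRight l (PySem.List.pyGetD op 1 0)) (PySem.List.pyGetD op 1 0) hkle
        have hperm' :
            (PySem.List.insert l
              (PySem.List.bisectRight l (PySem.List.pyGetD op 1 0) : Int)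
              (PySem.List.pyGetD op 1 0)).Perm (PySem.Set.add s (PySem.List.pyGetD op 1 0)) := by
          rw [hins, PySem.Set.add_of_not_mem hmem]
          refine List.Perm.trans List.perm_middle ?_
          rw [List.take_append_drop]
          exact List.Perm.trans (hperm.cons _) (List.perm_append_singleton _ s).symm
        have hsorted' :
            (PySem.List.insert l
              (PySem.List.bisectRight l (PySem.List.pyGetD op 1 0) : Int)
              (PySem.List.pyGetD op 1 0)).Pairwise (fun a b => a ≤ b) := by
          rw [hins]; exact insort_pairwise l hsorted _
        refine ih (pre ++ [op]) _ res _ (by simp [← hsplit]) hperm' hsorted' ?_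
        intro o
        rw [PySem.Set.add_of_not_mem hmem]
        simp only [List.mem_append, List.mem_singleton]
        constructor
        · rintro (ho | rfl)
          · obtain ⟨p, hp, h⟩ := (hinv o).mp ho
            exact ⟨p, Or.inl hp, h⟩
          · exact ⟨op, Or.inr rfl, h1, rfl⟩
        · rintro ⟨p, hp, hh1, hh2⟩
          rcases hp with hp | rfl
          · exact Or.inl ((hinv o).mpr ⟨p, hp, hh1, hh2⟩)
          · exact Or.inr hh2.symm
    · by_cases h2 : PySem.List.pyGetD op 0 0 = 2
      · -- query
        have hne : op ≠ [] := ne_nil_of_pyGetD op 2 (by norm_num) h2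
        set x := PySem.List.pyGetD op 1 0 with hx
        set e := x + PySem.List.pyGetD op 2 0 - 1 with he
        have hcond :
            (PySem.List.bisectLeft l x < PySem.List.bisectRight l e) ↔
            (hitB pre x e = true) := by
          rw [bisect_window l hsorted, hitB, List.any_eq_true]
          constructor
          · rintro ⟨o, ho, hxo, hoe⟩
            obtain ⟨p, hp, hh1, hh2⟩ := (hinv o).mp (hperm.mem_iff.mp ho)
            refine ⟨p, hp, ?_⟩
            have hpne : p ≠ [] := ne_nil_of_pyGetD p 1 (by norm_num) hh1
            simp [hpne, hh1, hh2, hxo, hoe]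
          · rintro ⟨p, hp, hb⟩
            simp only [Bool.and_eq_true, decide_eq_true_eq, beq_iff_eq] at hb
            obtain ⟨⟨⟨_, hph⟩, hxp⟩, hpe⟩ := hb
            exact ⟨PySem.List.pyGetD p 1 0,
              hperm.mem_iff.mpr ((hinv _).mpr ⟨p, hp, hph, rfl⟩), hxp, hpe⟩
        have hstr :
            (if PySem.List.bisectLeft l x < PySem.List.bisectRight l e then ("0":String) else "1")
            = (if hitB pre x e then ("0":String) else "1") := by
          by_cases hlt : PySem.List.bisectLeft l x < PySem.List.bisectRight l e
          · rw [if_pos hlt, if_pos (hcond.mp hlt)]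
          · rw [if_neg hlt, if_neg (fun h => hlt (hcond.mpr h))]
        have hA : solutionStepA (s, res, l) op =
            (s, res ++ [if hitB pre x e then "0" else "1"], l) := by
          simp only [solutionStepA, h2]
          simp [← hx, ← he, hstr]
        have hB : solutionStepB opsAll (PySem.Str.join "" res) ((pre.length : Int), op)
            = PySem.Str.join "" res ++ (if hitB pre x e then "0" else "1") := by
          simp [solutionStepB, hne, h2, htake, ← hx, ← he]
        rw [hA, hB, ← join_empty_snoc, ← hlen']
        refine ih (pre ++ [op]) s _ l (by simp [← hsplit]) hperm hsorted ?_
        intro o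
        rw [hinv o]
        constructor
        · rintro ⟨p, hp, h⟩; exact ⟨p, by simp [hp], h⟩
        · rintro ⟨p, hp, hh1, hh2⟩
          rcases List.mem_append.mp hp with hp | hp
          · exact ⟨p, hp, hh1, hh2⟩
          · simp at hp; subst hp; exact absurd hh1 h1
      · -- skip
        have hA : solutionStepA (s, res, l) op = (s, res, l) := by
          simp [solutionStepA, h1, h2]
        have hB : solutionStepB opsAll (PySem.Str.join "" res) ((pre.length : Int), op)
            = PySem.Str.join "" res := by
          by_cases hne : op = []
          · subst hne; simp [solutionStepB]
          · simp [solutionStepB, hne, h2]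
        rw [hA, hB, ← hlen']
        refine ih (pre ++ [op]) s res l (by simp [← hsplit]) hperm hsorted ?_
        intro o
        rw [hinv o]
        constructor
        · rintro ⟨p, hp, h⟩; exact ⟨p, by simp [hp], h⟩
        · rintro ⟨p, hp, hh1, hh2⟩
          rcases List.mem_append.mp hp with hp | hp
          · exact ⟨p, hp, hh1, hh2⟩
          · simp at hp; subst hp; exact absurd hh1 h1

-- ===== VERDICT (by name: the statement is the Claim_ definition above) =====
theorem solution_spec : Claim_equal_solution := by
  intro operations _ _
  unfold Spec_solution solution solution_alt
  have h := fold_agree operations operations [] PySem.Set.empty [] []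
    rfl (List.Perm.refl _) List.Pairwise.nil
    (by intro o; simp [PySem.Set.empty])
  simpa [PySem.List.enumerate, PySem.Str.join, PySem.Chars.join, List.intercalate] using h
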